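-- pv_equiv track=rewrite | github.com/csvw/CNN-Numpy-Implementation | CNN3/DLData/ShapeData.py | compute_c
-- ===== SOURCE A (Python) =====
-- def compute_c(e, n, t):
--     if e:
--         result = 0
--         for i in range(1, n+1):
--             if i <= t:
--                 if i % 2 == 0:
--                     result += 1
--             else:
--                 if i % 2 == 1:
--                     result -= 1
--         return result
--     else:
--         result = 0
--         for i in range(1, n+1):
--             if i <= t:
--                 if i % 2 == 1:
--                     result += 1
--             else:
--                 if i % 2 == 0:
--                     result -= 1
--         return result
-- ===== SOURCE B (Python) =====
-- def compute_c(e, n, t):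
--     N = max(0, n)
--     k = max(0, min(n, t))
--     evens_k, odds_k = k // 2, (k + 1) // 2
--     evens_N, odds_N = N // 2, (N + 1) // 2
--     if e:
--         return evens_k - (odds_N - odds_k)
--     else:
--         return odds_k - (evens_N - evens_k)
-- ===== Notes on version B (the rewrite author's own statement) =====
-- stated objective: faster
-- what changed: Replaced the O(n) loop over range(1, n+1) with a closed-form computation: the answer is expressed via parity counts (evens/odds) of the two sub-ranges [1, min(n,t)] and (t, n], each obtained with integer division by 2.
import Mathlib
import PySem

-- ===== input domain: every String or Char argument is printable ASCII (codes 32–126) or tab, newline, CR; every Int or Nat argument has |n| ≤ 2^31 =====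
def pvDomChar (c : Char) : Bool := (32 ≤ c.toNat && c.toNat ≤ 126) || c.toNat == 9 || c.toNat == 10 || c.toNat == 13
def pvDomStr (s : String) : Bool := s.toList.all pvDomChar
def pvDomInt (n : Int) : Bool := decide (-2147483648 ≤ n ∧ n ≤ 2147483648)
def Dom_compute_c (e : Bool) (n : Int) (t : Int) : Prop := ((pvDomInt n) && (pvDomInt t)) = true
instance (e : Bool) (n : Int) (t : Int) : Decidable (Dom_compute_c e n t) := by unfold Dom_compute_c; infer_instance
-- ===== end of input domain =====

-- B replaces A's O(n) loop over range(1, n+1) by O(1) closed-form parity counts of the two index sub-ranges.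

-- ===== PORT A =====
def compute_c (e : Bool) (n : Int) (t : Int) : Int :=
  if e then
    (PySem.List.pyRange 1 (n + 1) 1).foldl
      (fun result i =>
        if i ≤ t then (if PySem.Int.mod i 2 = 0 then result + 1 else result)
        else (if PySem.Int.mod i 2 = 1 then result - 1 else result)) 0
  else
    (PySem.List.pyRange 1 (n + 1) 1).foldl
      (fun result i =>
        if i ≤ t then (if PySem.Int.mod i 2 = 1 then result + 1 else result)
        else (if PySem.Int.mod i 2 = 0 then result - 1 else result)) 0

-- ===== PORT B =====
def compute_c_alt (e : Bool) (n : Int) (t : Int) : Int :=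
  let N := max 0 n
  let k := max 0 (min n t)
  let evens_k := PySem.Int.floordiv k 2
  let odds_k := PySem.Int.floordiv (k + 1) 2
  let evens_N := PySem.Int.floordiv N 2
  let odds_N := PySem.Int.floordiv (N + 1) 2
  if e then evens_k - (odds_N - odds_k)
  else odds_k - (evens_N - evens_k)

-- ===== PRECONDITION & SPEC =====
def Spec_compute_c (e : Bool) (n : Int) (t : Int) (out : Int) : Prop := out = compute_c_alt e n t
instance (e : Bool) (n : Int) (t : Int) (out : Int) : Decidable (Spec_compute_c e n t out) := by unfold Spec_compute_c; infer_instance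

-- ===== CLAIM (what is proved, stated in full; the proofs are below) =====
def Claim_equal_compute_c : Prop := ∀ (e : Bool) (n : Int) (t : Int), Dom_compute_c e n t → Spec_compute_c e n t (compute_c e n t)

-- ===== LEMMAS AND PROOFS =====

lemma foldA_true (t : Int) (m : Nat) :
    (PySem.List.pyRange 1 ((m : Int) + 1) 1).foldl
      (fun result i =>
        if i ≤ t then (if PySem.Int.mod i 2 = 0 then result + 1 else result)
        else (if PySem.Int.mod i 2 = 1 then result - 1 else result)) 0
    = (max 0 (min (m : Int) t)) / 2
      - (((m : Int) + 1) / 2 - (max 0 (min (m : Int) t) + 1) / 2) := by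
  induction m with
  | zero => simp
  | succ m ih =>
    rw [show ((m + 1 : Nat) : Int) + 1 = ((m : Int) + 1) + 1 by push_cast; ring,
        PySem.List.pyRange_one_succ_right (by omega : (1:Int) ≤ (m : Int) + 1),
        List.foldl_append, ih]
    simp only [List.foldl_cons, List.foldl_nil,
      PySem.Int.mod_eq_emod_of_pos (a := (m : Int) + 1) (by omega : (0:Int) < 2)]
    split_ifs <;> omega

lemma foldA_false (t : Int) (m : Nat) :
    (PySem.List.pyRange 1 ((m : Int) + 1) 1).foldl
      (fun result i =>
        if i ≤ t then (if PySem.Int.mod i 2 = 1 then result + 1 else result)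
        else (if PySem.Int.mod i 2 = 0 then result - 1 else result)) 0
    = (max 0 (min (m : Int) t) + 1) / 2
      - (((m : Int)) / 2 - (max 0 (min (m : Int) t)) / 2) := by
  induction m with
  | zero => simp
  | succ m ih =>
    rw [show ((m + 1 : Nat) : Int) + 1 = ((m : Int) + 1) + 1 by push_cast; ring,
        PySem.List.pyRange_one_succ_right (by omega : (1:Int) ≤ (m : Int) + 1),
        List.foldl_append, ih]
    simp only [List.foldl_cons, List.foldl_nil,
      PySem.Int.mod_eq_emod_of_pos (a := (m : Int) + 1) (by omega : (0:Int) < 2)]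
    split_ifs <;> omega

lemma alt_closed (e : Bool) (n t : Int) :
    compute_c_alt e n t =
      if e then (max 0 (min n t)) / 2 - ((max 0 n + 1) / 2 - (max 0 (min n t) + 1) / 2)
      else (max 0 (min n t) + 1) / 2 - ((max 0 n) / 2 - (max 0 (min n t)) / 2) := by
  unfold compute_c_alt
  simp only [PySem.Int.floordiv_eq_ediv_of_pos (by omega : (0:Int) < 2)]

-- ===== VERDICT (by name: the statement is the Claim_ definition above) =====
theorem compute_c_spec : Claim_equal_compute_c := by
  intro e n t _
  unfold Spec_compute_c
  rw [alt_closed]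
  by_cases hn : 0 ≤ n
  · obtain ⟨m, rfl⟩ : ∃ m : Nat, n = (m : Int) := ⟨n.toNat, (Int.toNat_of_nonneg hn).symm⟩
    cases e <;>
      simp only [compute_c, if_true, if_false, Bool.false_eq_true, foldA_true, foldA_false] <;>
      omega
  · have hnil : PySem.List.pyRange 1 (n + 1) 1 = [] :=
      PySem.List.pyRange_one_eq_nil (by omega)
    cases e <;> simp [compute_c, hnil] <;> omega
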